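-- pv_equiv track=rewrite | github.com/JeanPhilipLalumiere/MCGT | tools/probe_first_errors_context.py | bracket_depth_upto
-- ===== SOURCE A (Python) =====
-- def bracket_depth_upto(text: str) -> int:
--     depth = 0; in_str = None; esc = False
--     for ch in text:
--         if in_str:
--             if esc: esc = False
--             elif ch == "\\": esc = True
--             elif ch == in_str: in_str = None
--             continue
--         if ch in ("'", '"'): in_str = ch
--         elif ch in "([{": depth += 1
--         elif ch in ")]}": depth -= 1 if depth>0 else 0
--     return depth
-- ===== SOURCE B (Python) =====
-- def bracket_depth_upto(text: str) -> int:
--     depth = 0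
--     i = 0
--     n = len(text)
--     while i < n:
--         ch = text[i]
--         if ch in "'\"":
--             i += 1
--             while i < n:
--                 if text[i] == "\\":
--                     i += 2
--                 elif text[i] == ch:
--                     i += 1
--                     break
--                 else:
--                     i += 1
--         else:
--             if ch in "([{":
--                 depth += 1
--             elif ch in ")]}" and depth > 0:
--                 depth -= 1
--             i += 1
--     return depth
-- ===== Notes on version B (the rewrite author's own statement) =====
-- stated objective: alternative
-- what changed: Replaces A's single for-loop state machine (in_str/esc flags carried across every character) with an index-based while loop that, on a quote, enters an inner loop consuming the whole string literal (jumping two past each backslash), so no string-mode flags exist in the outer loop.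
import Mathlib
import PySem

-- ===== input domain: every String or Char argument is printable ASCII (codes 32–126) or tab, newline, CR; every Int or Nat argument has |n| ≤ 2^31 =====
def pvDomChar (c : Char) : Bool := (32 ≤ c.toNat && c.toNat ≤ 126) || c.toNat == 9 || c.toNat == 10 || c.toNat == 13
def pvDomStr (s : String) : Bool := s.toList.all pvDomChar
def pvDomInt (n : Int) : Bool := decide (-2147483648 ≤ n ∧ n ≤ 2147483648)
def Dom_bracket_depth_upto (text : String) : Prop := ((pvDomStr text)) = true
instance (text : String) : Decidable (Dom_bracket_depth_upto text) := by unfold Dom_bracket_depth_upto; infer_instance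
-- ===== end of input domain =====

-- B replaces A's flag-carrying state machine with an index-style scan whose inner loop
-- consumes each whole string literal; same O(n) cost, different decomposition.


-- ===== PORT A =====
-- state = (depth, in_str, esc); one fold step per character, exactly A's branch order
def aStep (s : Int × Option Char × Bool) (ch : Char) : Int × Option Char × Bool :=
  match s with
  | (depth, some q, esc) =>
    if esc then (depth, some q, false)
    else if ch = '\\' then (depth, some q, true)
    else if ch = q then (depth, none, false)
    else (depth, some q, esc)
  | (depth, none, esc) =>
    if ch = '\'' ∨ ch = '"' then (depth, some ch, esc)
    else if ch = '(' ∨ ch = '[' ∨ ch = '{' then (depth + 1, none, esc)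
    else if ch = ')' ∨ ch = ']' ∨ ch = '}' then
      (depth - (if depth > 0 then 1 else 0), none, esc)
    else (depth, none, esc)

def bracket_depth_upto (text : String) : Int :=
  (text.toList.foldl aStep (0, none, false)).1

-- ===== PORT B =====
-- Source B's inner while loop: consume the rest of a string literal opened by quote q,
-- returning the suffix after the literal (i += 2 past a backslash = drop 1 more char)
def altSkip (q : Char) : List Char → List Char
  | [] => []
  | c :: rest =>
    if c = '\\' then altSkip q (rest.drop 1)
    else if c = q then rest
    else altSkip q rest
termination_by l => l.length
decreasing_by
  all_goals (simp; try omega)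

-- needed by altGo's termination proof: the inner loop only consumes characters
theorem altSkip_length_le_fuel (n : Nat) : ∀ (l : List Char), l.length ≤ n → ∀ (q : Char),
    (altSkip q l).length ≤ l.length := by
  induction n with
  | zero =>
    intro l h q
    have : l = [] := List.eq_nil_of_length_eq_zero (Nat.le_zero.mp h)
    subst this; simp [altSkip]
  | succ n ih =>
    intro l h q
    match l with
    | [] => simp [altSkip]
    | c :: rest =>
      by_cases hb : c = '\\'
      · have h1 : (rest.drop 1).length ≤ n := by simp at h ⊢; omega
        have := ih (rest.drop 1) h1 q
        have h2 : (rest.drop 1).length ≤ rest.length := by simp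
        simp only [altSkip, if_pos hb, List.length_cons]; omega
      · by_cases hq : c = q
        · subst hq
          simp [altSkip, hb]
        · have h1 : rest.length ≤ n := by simp at h; omega
          have := ih rest h1 q
          simp only [altSkip, if_neg hb, if_neg hq, List.length_cons]; omega

theorem altSkip_length_le (q : Char) (l : List Char) : (altSkip q l).length ≤ l.length :=
  altSkip_length_le_fuel l.length l (Nat.le_refl _) q

-- Source B's outer while loop over the remaining characters
def altGo (cs : List Char) (depth : Int) : Int :=
  match cs with
  | [] => depth
  | c :: rest =>
    if c = '\'' ∨ c = '"' then altGo (altSkip c rest) depth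
    else if c = '(' ∨ c = '[' ∨ c = '{' then altGo rest (depth + 1)
    else if (c = ')' ∨ c = ']' ∨ c = '}') ∧ depth > 0 then altGo rest (depth - 1)
    else altGo rest depth
termination_by cs.length
decreasing_by
  · have := altSkip_length_le c rest; simp only [List.length_cons]; omega
  all_goals simp

def bracket_depth_upto_alt (text : String) : Int := altGo text.toList 0

-- ===== PRECONDITION & SPEC =====
def Spec_bracket_depth_upto (text : String) (out : Int) : Prop := out = bracket_depth_upto_alt text
instance (text : String) (out : Int) : Decidable (Spec_bracket_depth_upto text out) := by unfold Spec_bracket_depth_upto; infer_instance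

-- ===== CLAIM (what is proved, stated in full; the proofs are below) =====
def Claim_equal_bracket_depth_upto : Prop := ∀ (text : String), Dom_bracket_depth_upto text → Spec_bracket_depth_upto text (bracket_depth_upto text)

-- ===== LEMMAS AND PROOFS =====

-- In-string processing: A's fold from state (depth, some q, false) over rest equals the
-- fold from the neutral state over the suffix B's altSkip leaves.
theorem skip_fold (n : Nat) : ∀ (rest : List Char), rest.length ≤ n → ∀ (q : Char) (depth : Int),
    (List.foldl aStep (depth, some q, false) rest).1
      = (List.foldl aStep ((depth, none, false) : Int × Option Char × Bool) (altSkip q rest)).1 := by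
  induction n with
  | zero =>
    intro rest h q depth
    have : rest = [] := List.eq_nil_of_length_eq_zero (Nat.le_zero.mp h)
    subst this; simp [altSkip]
  | succ n ih =>
    intro rest h q depth
    match rest with
    | [] => simp [altSkip]
    | c :: rest' =>
      by_cases hb : c = '\\'
      · subst hb
        rw [altSkip]
        simp only [List.foldl, aStep, if_neg (Bool.false_ne_true)]
        match rest' with
        | [] => simp [altSkip]
        | d :: rest'' =>
          simp only [List.foldl, aStep, List.drop]
          have hlen : rest''.length ≤ n := by simp at h; omega
          exact ih rest'' hlen q depth
      · by_cases hq : c = q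
        · subst hq
          simp [altSkip, List.foldl, aStep, hb]
        · rw [altSkip]
          simp only [List.foldl, aStep, if_neg hb, if_neg hq,
            if_neg (Bool.false_ne_true)]
          have hlen : rest'.length ≤ n := by simp at h; omega
          exact ih rest' hlen q depth

-- The whole scan: A's fold from the neutral state computes B's altGo.
theorem main_fold (n : Nat) : ∀ (cs : List Char), cs.length ≤ n → ∀ (depth : Int),
    (List.foldl aStep ((depth, none, false) : Int × Option Char × Bool) cs).1 = altGo cs depth := by
  induction n with
  | zero =>
    intro cs h depth
    have : cs = [] := List.eq_nil_of_length_eq_zero (Nat.le_zero.mp h)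
    subst this; rw [altGo]; rfl
  | succ n ih =>
    intro cs h depth
    match cs with
    | [] => rw [altGo]; rfl
    | c :: rest =>
      have hlen : rest.length ≤ n := by simp at h; omega
      rw [altGo]
      by_cases hq : c = '\'' ∨ c = '"'
      · simp only [List.foldl, aStep, if_pos hq]
        rw [skip_fold rest.length rest (Nat.le_refl _) c depth]
        have hsl : (altSkip c rest).length ≤ n :=
          Nat.le_trans (altSkip_length_le c rest) hlen
        exact ih (altSkip c rest) hsl depth
      · by_cases ho : c = '(' ∨ c = '[' ∨ c = '{'
        · simp only [List.foldl, aStep, if_neg hq, if_pos ho]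
          exact ih rest hlen (depth + 1)
        · by_cases hc : c = ')' ∨ c = ']' ∨ c = '}'
          · simp only [List.foldl, aStep, if_neg hq, if_neg ho, if_pos hc]
            by_cases hd : depth > 0
            · simp only [if_pos hd, if_pos (And.intro hc hd)]
              exact ih rest hlen (depth - 1)
            · have hcd : ¬ ((c = ')' ∨ c = ']' ∨ c = '}') ∧ depth > 0) := by
                intro hx; exact hd hx.2
              simp only [if_neg hd, if_neg hcd, Int.sub_zero]
              exact ih rest hlen depth
          · have hcd : ¬ ((c = ')' ∨ c = ']' ∨ c = '}') ∧ depth > 0) := by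
              intro hx; exact hc hx.1
            simp only [List.foldl, aStep, if_neg hq, if_neg ho, if_neg hc, if_neg hcd]
            exact ih rest hlen depth

-- ===== VERDICT (by name: the statement is the Claim_ definition above) =====
theorem bracket_depth_upto_spec : Claim_equal_bracket_depth_upto := by
  intro text _
  unfold Spec_bracket_depth_upto bracket_depth_upto bracket_depth_upto_alt
  exact main_fold text.toList.length text.toList (Nat.le_refl _) 0
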